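-- pv_equiv track=rewrite | github.com/m-yoshinaka/sapphire | sapphire/sapphire_with_chunker.py | _chunk2index
-- ===== SOURCE A (Python) =====
-- def _chunk2index(chunks):
--     chunk_index = []
--     i = 1
--     for cnk in chunks:
--         c_len = len(cnk)
--         index = tuple(j for j in range(i, i + c_len))
--         chunk_index.append(index)
--         i += c_len
--     return chunk_index
-- ===== SOURCE B (Python) =====
-- def _chunk2index(chunks):
--     lengths = [len(cnk) for cnk in chunks]
--     starts = [1]
--     for c_len in lengths:
--         starts.append(starts[-1] + c_len)
--     return [tuple(range(s, s + c_len)) for s, c_len in zip(starts, lengths)]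
-- ===== Notes on version B (the rewrite author's own statement) =====
-- stated objective: alternative
-- what changed: Two-phase decomposition: first build the chunk-length list and an explicit prefix-sum offset table, then map each (start, length) pair to tuple(range(...)), instead of threading one running counter while appending inside a single loop.
import Mathlib
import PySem

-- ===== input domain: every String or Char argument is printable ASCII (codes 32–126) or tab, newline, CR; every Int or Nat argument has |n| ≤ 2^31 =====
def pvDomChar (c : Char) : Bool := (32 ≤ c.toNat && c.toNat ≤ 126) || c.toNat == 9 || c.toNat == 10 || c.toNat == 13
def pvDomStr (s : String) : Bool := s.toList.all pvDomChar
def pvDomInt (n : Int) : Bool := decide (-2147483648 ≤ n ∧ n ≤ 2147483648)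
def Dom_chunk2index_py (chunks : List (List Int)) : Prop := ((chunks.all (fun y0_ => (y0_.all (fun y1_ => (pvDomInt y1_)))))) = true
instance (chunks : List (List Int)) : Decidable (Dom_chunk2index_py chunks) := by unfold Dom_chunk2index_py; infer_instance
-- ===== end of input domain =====

-- B replaces the single counter-threading loop by a two-phase decomposition
-- (explicit prefix-sum offset table, then a map over zipped starts/lengths); objective: alternative, same cost.


-- ===== PORT A =====
-- literal port: one foldl over chunks carrying (chunk_index, i)
def chunk2index_py (chunks : List (List Int)) : List (List Int) :=
  (chunks.foldl
    (fun (st : List (List Int) × Int) cnk =>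
      let cLen : Int := cnk.length
      let index := PySem.List.pyRange st.2 (st.2 + cLen) 1
      (st.1 ++ [index], st.2 + cLen))
    ([], 1)).1

-- ===== PORT B =====
-- phase 1 of Source B: lengths, then prefix-sum offset table (starts[-1] ported as getLastD 0; starts is never empty)
-- phase 2: map each (start, length) pair of the zip to its range
def chunk2index_py_alt (chunks : List (List Int)) : List (List Int) :=
  let lengths : List Int := chunks.map (fun cnk => (cnk.length : Int))
  let starts : List Int := lengths.foldl (fun (st : List Int) cLen => st ++ [st.getLastD 0 + cLen]) [1]
  (starts.zip lengths).map (fun p => PySem.List.pyRange p.1 (p.1 + p.2) 1)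

-- ===== PRECONDITION & SPEC =====
def Spec_chunk2index_py (chunks : List (List Int)) (out : List (List Int)) : Prop := out = chunk2index_py_alt chunks
instance (chunks : List (List Int)) (out : List (List Int)) : Decidable (Spec_chunk2index_py chunks out) := by unfold Spec_chunk2index_py; infer_instance

-- ===== CLAIM (what is proved, stated in full; the proofs are below) =====
def Claim_equal_chunk2index_py : Prop := ∀ (chunks : List (List Int)), Dom_chunk2index_py chunks → Spec_chunk2index_py chunks (chunk2index_py chunks)

-- ===== LEMMAS AND PROOFS =====

-- common characterisation: the list of ranges for chunks starting at offset i
def pvSpecGo (chunks : List (List Int)) (i : Int) : List (List Int) :=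
  match chunks with
  | [] => []
  | c :: cs => PySem.List.pyRange i (i + (c.length : Int)) 1 :: pvSpecGo cs (i + (c.length : Int))

-- the same, indexed by the length list
def pvSpecLen (ls : List Int) (i : Int) : List (List Int) :=
  match ls with
  | [] => []
  | L :: ls => PySem.List.pyRange i (i + L) 1 :: pvSpecLen ls (i + L)

lemma pvSpecGo_eq_len (chunks : List (List Int)) (i : Int) :
    pvSpecGo chunks i = pvSpecLen (chunks.map (fun c => (c.length : Int))) i := by
  induction chunks generalizing i with
  | nil => rfl
  | cons c cs ih => simp [pvSpecGo, pvSpecLen, ih]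

-- A's fold accumulates exactly pvSpecGo
lemma chunkA_fold (chunks : List (List Int)) (acc : List (List Int)) (i : Int) :
    (chunks.foldl
      (fun (st : List (List Int) × Int) cnk =>
        let cLen : Int := cnk.length
        let index := PySem.List.pyRange st.2 (st.2 + cLen) 1
        (st.1 ++ [index], st.2 + cLen))
      (acc, i)).1 = acc ++ pvSpecGo chunks i := by
  induction chunks generalizing acc i with
  | nil => simp [pvSpecGo]
  | cons c cs ih => simp [List.foldl, pvSpecGo, ih]

-- the starts-table aux: offsets after i for the remaining lengths
def pvStartsAux (ls : List Int) (i : Int) : List Int :=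
  match ls with
  | [] => []
  | L :: ls => (i + L) :: pvStartsAux ls (i + L)

lemma starts_fold (ls : List Int) (acc : List Int) (i : Int) :
    ls.foldl (fun (st : List Int) cLen => st ++ [st.getLastD 0 + cLen]) (acc ++ [i])
      = (acc ++ [i]) ++ pvStartsAux ls i := by
  induction ls generalizing acc i with
  | nil => simp [pvStartsAux]
  | cons L ls ih =>
      simp only [List.foldl, pvStartsAux]
      have h1 : (acc ++ [i]).getLastD 0 = i := by simp
      rw [h1]
      have := ih (acc ++ [i]) (i + L)
      simp only [List.append_assoc] at this ⊢
      simpa using this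

lemma zip_starts (ls : List Int) (i : Int) :
    ((i :: pvStartsAux ls i).zip ls).map (fun p => PySem.List.pyRange p.1 (p.1 + p.2) 1)
      = pvSpecLen ls i := by
  induction ls generalizing i with
  | nil => rfl
  | cons L ls ih =>
      rw [pvStartsAux, List.zip_cons_cons, List.map_cons, ih]
      rfl

-- ===== VERDICT (by name: the statement is the Claim_ definition above) =====
theorem chunk2index_py_spec : Claim_equal_chunk2index_py := by
  intro chunks _
  unfold Spec_chunk2index_py chunk2index_py
  simp only [chunk2index_py_alt]
  rw [chunkA_fold chunks [] 1]
  have hs := starts_fold (chunks.map fun cnk => (cnk.length : Int)) [] 1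
  simp only [List.nil_append] at hs
  rw [hs]
  have : ([1] ++ pvStartsAux (chunks.map fun cnk => (cnk.length : Int)) 1)
      = (1 : Int) :: pvStartsAux (chunks.map fun cnk => (cnk.length : Int)) 1 := by simp
  rw [this, zip_starts, pvSpecGo_eq_len]
  simp
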